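-- pv_equiv track=rewrite | github.com/Nuthouse01/PMX-VMD-Scripting-Tools | python/_translation_tools.py | piecewise_translate
-- ===== SOURCE A (Python) =====
-- from typing import List, Tuple, TypeVar
--
-- STR_OR_STRLIST = TypeVar("STR_OR_STRLIST", str, List[str])
--
-- def piecewise_translate(in_list: STR_OR_STRLIST, in_dict: dict) -> STR_OR_STRLIST:
-- 	"""
-- 	Apply piecewise translation to inputs when given a mapping dict.
-- 	Mapping dict will usually be the builtin comprehensive 'words_dict' or some results found from Google Translate.
-- 	From each position in the string(ordered), check each map entry(ordered). Dict should have keys ordered from longest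
-- 	to shortest to avoid "undershadowing" problem.
-- 	Always returns what it produces, even if not a complete translation. Outer layers are responsible for checking if
-- 	the translation is "complete" before using it.
--
-- 	:param in_list: list of JP strings, or a single JP string
-- 	:param in_dict: dict of mappings from JP substrings to EN substrings
-- 	:return: list of resulting strings, or a single resulting string
-- 	"""
-- 	input_is_str = isinstance(in_list, str)
-- 	if input_is_str: in_list = [in_list]  # force it to be a list anyway so I don't have to change my structure
-- 	outlist = []  # list to build & return
--
-- 	dictitems = list(in_dict.items())
--
-- 	for out in in_list:
-- 		if (not out) or out.isspace():  # support bad/missing data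
-- 			outlist.append("JP_NULL")
-- 			continue
-- 		# goal: substrings that match keys of "words_dict" get replaced
-- 		# NEW ARCHITECTURE: starting from each char, try to match against the contents of the dict. longest items are first!
-- 		i = 0
-- 		while i < len(out):  # starting from each char of the string,
-- 			found_match = False
-- 			for (key, val) in dictitems:  # try to find anything in the dict to match against,
-- 				if out.startswith(key, i):  # and if something is found starting from 'i',
-- 					found_match = True
-- 					# i am going to replace it key->val, but first maybe insert space before or after or both.
-- 					# note: letter/number are the ONLY things that use joinchar. all punctuation and all JP stuff do not use joinchar.
-- 					# if 'begin-1' is a valid index and the char at that index is letter/number, then PREPEND a space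
-- 					before_space = " " if i != 0 and out[i-1].isalnum() else ""
-- 					# if "begin+len(key)" is a valid index and the char at that index is letter/number, then APPEND a space
-- 					after_space = " " if i+len(key) < len(out) and out[i+len(key)].isalnum() else ""
-- 					# now JOINCHAR is added, so now i substitute it
-- 					out = out[0:i] + before_space + val + after_space + out[i+len(key):]
-- 					# i don't need to examine or try to replace on any of these chars, so skip ahead a bit
-- 					i += len(val) + int(bool(before_space)) + int(bool(after_space))
-- 					# nothing else will match here, since I just replaced the thing, so break out of iterating on dict keys
-- 					break
-- 			if found_match is False:
-- 				i += 1
-- 		# once all uses of all keys have been replaced, then append the result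
-- 		outlist.append(out)
--
-- 	if input_is_str:	return outlist[0]	# if original input was a single string, then de-listify
-- 	else:				return outlist		# otherwise return as a list
-- ===== SOURCE B (Python) =====
-- def piecewise_translate(in_list, in_dict):
--     input_is_str = isinstance(in_list, str)
--     strings = [in_list] if input_is_str else in_list
--     # index the dict entries by the first character of their key; bucket order = dict order
--     buckets = {}
--     for key, val in in_dict.items():
--         buckets.setdefault(key[0], []).append((key, val))
--     outlist = []
--     for s in strings:
--         if not s or s.isspace():
--             outlist.append("JP_NULL")
--             continue
--         parts = []   # pieces of the output, joined once at the end
--         last = ""    # last character emitted so far ("" = nothing yet)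
--         pos = 0      # current position in s (the unconsumed part of s is s[pos:])
--         n = len(s)
--         while pos < n:
--             match = None
--             for kv in buckets.get(s[pos], ()):
--                 if s.startswith(kv[0], pos):
--                     match = kv
--                     break
--             if match is None:
--                 parts.append(s[pos])
--                 last = s[pos]
--                 pos += 1
--             else:
--                 key, val = match
--                 pos += len(key)
--                 piece = (" " if last.isalnum() else "") + val + \
--                         (" " if pos < n and s[pos].isalnum() else "")
--                 parts.append(piece)
--                 if piece:
--                     last = piece[-1]
--         outlist.append("".join(parts))
--     return outlist[0] if input_is_str else outlist
-- ===== Notes on version B (the rewrite author's own statement) =====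
-- stated objective: faster
-- what changed: B indexes the dict entries by the first character of their key (one bucket dict built once) and scans each string with a position index, a last-emitted-char variable and a list of output pieces joined once at the end, exploiting that the unscanned tail is always a suffix of the original string - instead of A's rescan of the whole dict at every position and full string rebuild at every replacement.
-- outside the precondition, e.g. on piecewise_translate([], {'': 'x'}): A returns [], B raises IndexError; on piecewise_translate([' '], {'': 'x'}): A returns ['JP_NULL'], B raises IndexError
import Mathlib
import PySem

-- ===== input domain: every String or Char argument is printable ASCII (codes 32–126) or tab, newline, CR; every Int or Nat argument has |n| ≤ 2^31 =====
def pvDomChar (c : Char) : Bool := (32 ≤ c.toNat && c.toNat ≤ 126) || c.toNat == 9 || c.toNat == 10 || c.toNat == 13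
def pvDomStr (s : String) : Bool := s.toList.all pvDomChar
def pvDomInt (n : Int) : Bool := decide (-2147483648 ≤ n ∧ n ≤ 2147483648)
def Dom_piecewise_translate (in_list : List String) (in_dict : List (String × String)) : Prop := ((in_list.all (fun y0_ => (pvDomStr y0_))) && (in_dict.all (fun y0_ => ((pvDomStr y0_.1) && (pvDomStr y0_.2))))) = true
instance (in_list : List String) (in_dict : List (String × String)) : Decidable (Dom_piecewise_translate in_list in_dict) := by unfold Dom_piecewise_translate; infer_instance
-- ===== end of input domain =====

-- B replaces A's per-position rescan of the whole dict and per-replacement string rebuild by a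
-- first-character bucket index over the dict entries plus a position-indexed scan collecting
-- output pieces (the unscanned tail is always a suffix of the original string); measured faster.

-- ===== PORT A =====
-- A's while-loop over the evolving string `out` and index `i`.  The inner
-- 'for (key,val) in dictitems: if out.startswith(key, i): … break' is ported as List.find?;
-- out.startswith(key, i) with 0 ≤ i is exactly PySem.Chars.startswith on (out.drop i) (exact here).
-- Fuel: the loop runs at most (len out) times whenever every matched key is nonempty (each
-- iteration shrinks len(out) - i by at least 1), which Pre_ guarantees; fuel only totalizes.
def pvLoopA (dictitems : List (String × String)) : Nat → List Char → Nat → List Char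
  | 0, out, _ => out
  | fuel+1, out, i =>
    if i < out.length then
      match dictitems.find? (fun kv => PySem.Chars.startswith (out.drop i) kv.1.toList) with
      | some kv =>
        -- before_space = " " if i != 0 and out[i-1].isalnum() else ""
        let before_space : List Char :=
          if i ≠ 0 ∧ PySem.Chars.isalnum (out.getD (i-1) ' ') = true then [' '] else []
        -- after_space = " " if i+len(key) < len(out) and out[i+len(key)].isalnum() else ""
        let after_space : List Char :=
          if i + kv.1.toList.length < out.length ∧
             PySem.Chars.isalnum (out.getD (i + kv.1.toList.length) ' ') = true then [' '] else []
        -- out = out[0:i] + before_space + val + after_space + out[i+len(key):]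
        let out' := out.take i ++ before_space ++ kv.2.toList ++ after_space ++ out.drop (i + kv.1.toList.length)
        -- i += len(val) + int(bool(before_space)) + int(bool(after_space))
        pvLoopA dictitems fuel out'
          (i + kv.2.toList.length + (if before_space.isEmpty then 0 else 1) + (if after_space.isEmpty then 0 else 1))
      | none => pvLoopA dictitems fuel out (i+1)
    else out

def pvTranslateA (dictitems : List (String × String)) (s : String) : String :=
  if s = "" ∨ PySem.Str.strIsspace s = true then "JP_NULL"
  else String.ofList (pvLoopA dictitems s.toList.length s.toList 0)

def piecewise_translate (in_list : List String) (in_dict : List (String × String)) : List String :=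
  in_list.foldl (fun outlist s => outlist ++ [pvTranslateA in_dict s]) []

-- ===== PORT B =====
-- Source B's key[0]; none exactly where Source B raises IndexError (an empty key, outside Pre_).
def pvHeadKey (s : String) : Option Char := s.toList.head?

-- buckets.setdefault(key[0], []).append((key, val)) over the dict entries, in dict order.
def pvBuckets (in_dict : List (String × String)) : PySem.Dict (Option Char) (List (String × String)) :=
  (in_dict.map (fun kv => (pvHeadKey kv.1, kv))).foldl
    (fun d p => d.modify p.1 [] (· ++ [p.2])) PySem.Dict.empty

-- Source B's while-loop: pos scans s, `last` is the last emitted char (none = ""), parts the pieces.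
-- s.startswith(key, pos) is PySem.Chars.startswith on (s.drop pos); "".isalnum() is false, so
-- last.isalnum() is Option.any; `if piece: last = piece[-1]` is the match on piece.getLast?.
-- Fuel = len s suffices (pos strictly increases); on exhaustion the untouched tail is appended.
def pvLoopB (buckets : PySem.Dict (Option Char) (List (String × String))) :
    Nat → List Char → Nat → Option Char → List (List Char) → List (List Char)
  | 0, s, pos, _, parts => parts ++ [s.drop pos]
  | fuel+1, s, pos, last, parts =>
    if h : pos < s.length then
      match (buckets.getD (some s[pos]) []).find?
              (fun kv => PySem.Chars.startswith (s.drop pos) kv.1.toList) with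
      | none => pvLoopB buckets fuel s (pos+1) (some s[pos]) (parts ++ [[s[pos]]])
      | some kv =>
        let pos' := pos + kv.1.toList.length
        let piece := (if last.any PySem.Chars.isalnum = true then [' '] else []) ++ kv.2.toList ++
                     (if pos' < s.length ∧ PySem.Chars.isalnum (s.getD pos' ' ') = true then [' '] else [])
        pvLoopB buckets fuel s pos'
          (match piece.getLast? with | some c => some c | none => last) (parts ++ [piece])
    else parts

def pvTranslateB (buckets : PySem.Dict (Option Char) (List (String × String))) (s : String) : String :=
  if s = "" ∨ PySem.Str.strIsspace s = true then "JP_NULL"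
  else String.ofList (pvLoopB buckets s.toList.length s.toList 0 none []).flatten

def piecewise_translate_alt (in_list : List String) (in_dict : List (String × String)) : List String :=
  in_list.map (pvTranslateB (pvBuckets in_dict))

-- ===== PRECONDITION & SPEC =====
-- Pre_ excludes dicts containing the empty-string key — there A loops forever on any string it
-- actually scans (the empty key matches at every position without consuming input) and B's
-- first-character index raises IndexError — and requires the assoc-list keys to be distinct,
-- which is the canonical representation of a Python dict (a dict cannot hold duplicate keys).
def Pre_piecewise_translate (in_list : List String) (in_dict : List (String × String)) : Prop :=
  (∀ kv ∈ in_dict, kv.1 ≠ "") ∧ (in_dict.map Prod.fst).Nodup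
instance (in_list : List String) (in_dict : List (String × String)) : Decidable (Pre_piecewise_translate in_list in_dict) := by unfold Pre_piecewise_translate; infer_instance

def pvWitness_piecewise_translate : List String × (List (String × String)) :=
  (["ab1cd", "", "  "], [("b1", "X Y"), ("cd", ""), ("a", "z")])

def Spec_piecewise_translate (in_list : List String) (in_dict : List (String × String)) (out : List String) : Prop := out = piecewise_translate_alt in_list in_dict
instance (in_list : List String) (in_dict : List (String × String)) (out : List String) : Decidable (Spec_piecewise_translate in_list in_dict out) := by unfold Spec_piecewise_translate; infer_instance

-- ===== CLAIM (what is proved, stated in full; the proofs are below) =====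
def Claim_equal_piecewise_translate : Prop := ∀ (in_list : List String) (in_dict : List (String × String)), Dom_piecewise_translate in_list in_dict → Pre_piecewise_translate in_list in_dict → Spec_piecewise_translate in_list in_dict (piecewise_translate in_list in_dict)

-- ===== LEMMAS AND PROOFS =====

-- find? is unchanged by pre-filtering with a predicate implied by the searched one
lemma pv_find?_filter {α : Type} (l : List α) (p q : α → Bool)
    (h : ∀ x ∈ l, p x = true → q x = true) : l.find? p = (l.filter q).find? p := by
  induction l with
  | nil => rfl
  | cons a t ih =>
    by_cases hp : p a = true
    · simp [List.find?, hp, List.filter, h a (by simp) hp]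
    · by_cases hq : q a = true <;>
        simp [List.find?, hp, List.filter, hq, ih (fun x hx => h x (List.mem_cons_of_mem a hx))]

-- what the bucket of first-char c holds: exactly the dict entries whose key starts with c, in order
lemma pv_buckets_getD (in_dict : List (String × String)) (c : Char) :
    (pvBuckets in_dict).getD (some c) [] =
      in_dict.filter (fun kv => pvHeadKey kv.1 == some c) := by
  unfold pvBuckets
  rw [PySem.Dict.getD_foldl_modify_append]
  simp [PySem.Dict.getD_empty, List.filter_map, Function.comp_def]

-- the per-position match of A (scan the whole dict) equals B's (scan the first-char bucket)
lemma pv_find_eq (in_dict : List (String × String))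
    (hk : ∀ kv ∈ in_dict, kv.1.toList ≠ []) (c : Char) (t : List Char) :
    in_dict.find? (fun kv => PySem.Chars.startswith (c :: t) kv.1.toList) =
      ((pvBuckets in_dict).getD (some c) []).find?
        (fun kv => PySem.Chars.startswith (c :: t) kv.1.toList) := by
  rw [pv_buckets_getD]
  apply pv_find?_filter
  intro kv hkv hp
  rw [PySem.Chars.startswith_iff] at hp
  rcases hp with ⟨r, hr⟩
  rcases hne : kv.1.toList with _ | ⟨a, t'⟩
  · exact absurd hne (hk kv hkv)
  · rw [hne] at hr
    simp only [pvHeadKey, hne, List.head?]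
    cases hr
    simp

-- the "insert a space before?" conditions of A and B agree (F = output built so far)
lemma pv_before_eq (F r : List Char) :
    (decide (F.length ≠ 0 ∧ PySem.Chars.isalnum ((F ++ r).getD (F.length - 1) ' ') = true)) =
      (F.getLast?.any PySem.Chars.isalnum) := by
  rcases F.eq_nil_or_concat with rfl | ⟨F', x, rfl⟩
  · simp
  · simp only [List.concat_eq_append, List.getD_eq_getElem?_getD, List.length_append,
      List.length_cons, List.length_nil, Nat.add_sub_cancel]
    rw [List.getElem?_append_left (by simp), List.getLast?_append]
    simp

-- one matched entry's key is at most the remaining tail (gives pos' ≤ n)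
lemma pv_key_le (l : List (String × String)) (p : List Char) (kv : String × String)
    (hfind : l.find? (fun kv => PySem.Chars.startswith p kv.1.toList) = some kv) :
    kv.1.toList.length ≤ p.length := by
  have := List.find?_some hfind
  rw [PySem.Chars.startswith_iff] at this
  exact this.length_le

-- MAIN LOOP INVARIANT: with every dict key nonempty, A's loop on the evolving string
-- (parts.flatten ++ s.drop pos) at index (parts.flatten).length computes the flattening of
-- B's loop on (s, pos, last, parts), provided last is the last emitted character.
lemma pv_loop_eq (in_dict : List (String × String))
    (hk : ∀ kv ∈ in_dict, kv.1.toList ≠ []) :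
    ∀ (fuel : Nat) (s : List Char) (pos : Nat) (last : Option Char) (parts : List (List Char)),
      pos ≤ s.length → last = parts.flatten.getLast? →
      pvLoopA in_dict fuel (parts.flatten ++ s.drop pos) parts.flatten.length =
        (pvLoopB (pvBuckets in_dict) fuel s pos last parts).flatten := by
  intro fuel
  induction fuel with
  | zero => intro s pos last parts _ _; simp [pvLoopA, pvLoopB]
  | succ fuel ih =>
    intro s pos last parts hpos hlast
    by_cases h : pos < s.length
    · have hdrop : s.drop pos = s[pos] :: s.drop (pos + 1) := List.drop_eq_getElem_cons h
      have hlen : (parts.flatten ++ s.drop pos).length = parts.flatten.length + (s.length - pos) := by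
        simp
      have hlt : parts.flatten.length < (parts.flatten ++ s.drop pos).length := by omega
      have hdropF : (parts.flatten ++ s.drop pos).drop parts.flatten.length = s.drop pos :=
        List.drop_left
      rw [pvLoopA, pvLoopB]
      simp only [hlt, if_pos, h, dif_pos, hdropF]
      rw [hdrop, pv_find_eq in_dict hk s[pos] (s.drop (pos+1)), ← hdrop]
      cases hfind : ((pvBuckets in_dict).getD (some s[pos]) []).find?
          (fun kv => PySem.Chars.startswith (s.drop pos) kv.1.toList) with
      | none =>
        have : parts.flatten ++ s.drop pos = (parts ++ [[s[pos]]]).flatten ++ s.drop (pos + 1) := by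
          rw [hdrop]; simp
        rw [this]
        have hl : parts.flatten.length + 1 = (parts ++ [[s[pos]]]).flatten.length := by simp
        rw [hl, ih s (pos+1) (some s[pos]) (parts ++ [[s[pos]]]) (by omega) (by simp)]
      | some kv =>
        -- abbreviations
        set F := parts.flatten with hF
        have hklen : kv.1.toList.length ≤ s.length - pos := by
          have := pv_key_le _ _ _ hfind; simpa using this
        -- before_space conditions agree
        have hbefore :
            (if F.length ≠ 0 ∧ PySem.Chars.isalnum ((F ++ s.drop pos).getD (F.length - 1) ' ') = true
              then ([' '] : List Char) else []) =
            (if last.any PySem.Chars.isalnum = true then [' '] else []) := by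
          rw [hlast]
          by_cases hP : F.length ≠ 0 ∧ PySem.Chars.isalnum ((F ++ s.drop pos).getD (F.length - 1) ' ') = true
          · rw [if_pos hP]
            have hc : F.getLast?.any PySem.Chars.isalnum = true := by
              rw [← pv_before_eq F (s.drop pos)]; simpa using hP
            rw [hc]; rfl
          · rw [if_neg hP]
            have hc : F.getLast?.any PySem.Chars.isalnum = false := by
              rw [← pv_before_eq F (s.drop pos)]; simpa using hP
            rw [hc]; rfl
        -- after_space conditions agree
        have hidx : F.length + kv.1.toList.length < (F ++ s.drop pos).length ↔
            pos + kv.1.toList.length < s.length := by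
          simp only [List.length_append, List.length_drop]; omega
        have hgetd : (F ++ s.drop pos).getD (F.length + kv.1.toList.length) ' ' =
            s.getD (pos + kv.1.toList.length) ' ' := by
          simp only [List.getD_eq_getElem?_getD]
          rw [List.getElem?_append_right (by omega)]
          rw [show F.length + kv.1.toList.length - F.length = kv.1.toList.length from by omega,
            List.getElem?_drop]
        have hafter :
            (if F.length + kv.1.toList.length < (F ++ s.drop pos).length ∧
                PySem.Chars.isalnum ((F ++ s.drop pos).getD (F.length + kv.1.toList.length) ' ') = true
              then ([' '] : List Char) else []) =
            (if pos + kv.1.toList.length < s.length ∧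
                PySem.Chars.isalnum (s.getD (pos + kv.1.toList.length) ' ') = true
              then ([' '] : List Char) else []) := by
          have hiff : (F.length + kv.1.toList.length < (F ++ s.drop pos).length ∧
              PySem.Chars.isalnum ((F ++ s.drop pos).getD (F.length + kv.1.toList.length) ' ') = true) ↔
              (pos + kv.1.toList.length < s.length ∧
              PySem.Chars.isalnum (s.getD (pos + kv.1.toList.length) ' ') = true) := by
            rw [hgetd]; exact and_congr_left (fun _ => hidx)
          exact if_congr hiff rfl rfl
        set bs := (if last.any PySem.Chars.isalnum = true then ([' '] : List Char) else []) with hbs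
        set as := (if pos + kv.1.toList.length < s.length ∧
              PySem.Chars.isalnum (s.getD (pos + kv.1.toList.length) ' ') = true
            then ([' '] : List Char) else []) with has
        set piece := bs ++ kv.2.toList ++ as with hpiece
        -- the new evolving string is (parts ++ [piece]).flatten ++ s.drop (pos + klen)
        have htake : (F ++ s.drop pos).take F.length = F := List.take_left
        have hdropk : (F ++ s.drop pos).drop (F.length + kv.1.toList.length) =
            s.drop (pos + kv.1.toList.length) := by
          rw [← List.drop_drop, List.drop_left, List.drop_drop, Nat.add_comm]
        have hout' : F ++ bs ++ kv.2.toList ++ as ++ s.drop (pos + kv.1.toList.length)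
            = (parts ++ [piece]).flatten ++ s.drop (pos + kv.1.toList.length) := by
          simp [hpiece, hF]
        -- the new index is the new flatten's length
        have hi' : F.length + kv.2.toList.length + (if bs.isEmpty then 0 else 1) +
            (if as.isEmpty then 0 else 1) = (parts ++ [piece]).flatten.length := by
          have h1 : (if bs.isEmpty then 0 else 1) = bs.length := by
            rcases hc : last.any PySem.Chars.isalnum with _|_ <;> simp [hbs, hc]
          have h2 : (if as.isEmpty then 0 else 1) = as.length := by
            rw [has]
            by_cases hc : pos + kv.1.toList.length < s.length ∧
                PySem.Chars.isalnum (s.getD (pos + kv.1.toList.length) ' ') = true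
            · rw [if_pos hc]; rfl
            · rw [if_neg hc]; rfl
          rw [h1, h2]
          simp [hpiece, hF]
          omega
        -- the new last is the new flatten's last
        have hlast' : (match piece.getLast? with | some c => some c | none => last) =
            (parts ++ [piece]).flatten.getLast? := by
          cases hc : piece.getLast? with
          | some c => simp [List.getLast?_append, hc]
          | none => simp [List.getLast?_append, hc, hlast, hF]
        simp only [hbefore, hafter, htake, hdropk]
        simp only [← has]
        simp only [← hpiece]
        rw [hout', hi', hlast']
        exact ih s (pos + kv.1.toList.length) _ (parts ++ [piece]) (by omega) rfl
    · have hpn : pos = s.length := by omega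
      have : s.drop pos = [] := by simp [hpn]
      rw [pvLoopA, pvLoopB]
      simp [this, h]

-- per-string agreement
lemma pv_translate_eq (in_dict : List (String × String))
    (hk : ∀ kv ∈ in_dict, kv.1 ≠ "") (s : String) :
    pvTranslateA in_dict s = pvTranslateB (pvBuckets in_dict) s := by
  unfold pvTranslateA pvTranslateB
  by_cases hnull : s = "" ∨ PySem.Str.strIsspace s = true
  · rw [if_pos hnull, if_pos hnull]
  · rw [if_neg hnull, if_neg hnull]
    congr 1
    have hk' : ∀ kv ∈ in_dict, kv.1.toList ≠ [] := by
      intro kv hkv hnil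
      exact hk kv hkv (String.toList_eq_nil_iff.mp hnil)
    have := pv_loop_eq in_dict hk' s.toList.length s.toList 0 none [] (by omega) (by simp)
    simpa using this

-- ===== VERDICT (by name: the statement is the Claim_ definition above) =====
theorem piecewise_translate_spec : Claim_equal_piecewise_translate := by
  intro in_list in_dict _hdom hpre
  unfold Spec_piecewise_translate piecewise_translate piecewise_translate_alt
  rw [PySem.List.foldl_append_singleton_eq_map]
  exact List.map_congr_left (fun s _ => pv_translate_eq in_dict hpre.1 s)
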